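-- pv_equiv track=rewrite | github.com/Matchewmau/HairMixer | backend/hairmixer_app/logic/recommendation_engine.py | _is_compatible_length
-- ===== SOURCE A (Python) =====
-- from typing import List, Dict, Any
--
-- def _is_compatible_length(user_length: str, style_lengths: List[str]):
--     """Check length compatibility"""
--     length_order = ['pixie', 'short', 'medium', 'long', 'extra_long']
--
--     if user_length not in length_order or not style_lengths:
--         return False
--
--     user_idx = length_order.index(user_length)
--
--     # Allow styles within 1 step of user's preference
--     compatible_indices = [max(0, user_idx-1), user_idx, min(len(length_order)-1, user_idx+1)]
--     compatible_lengths = [length_order[i] for i in compatible_indices]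
--
--     return any(length in style_lengths for length in compatible_lengths)
-- ===== SOURCE B (Python) =====
-- def _is_compatible_length(user_length, style_lengths):
--     """Check length compatibility"""
--     length_order = ['pixie', 'short', 'medium', 'long', 'extra_long']
--     try:
--         user_idx = length_order.index(user_length)
--     except ValueError:
--         return False
--     for s in style_lengths:
--         if s in length_order and abs(length_order.index(s) - user_idx) <= 1:
--             return True
--     return False
-- ===== Notes on version B (the rewrite author's own statement) =====
-- stated objective: alternative
-- what changed: B loops over style_lengths with an index-distance test (|idx(s)-user_idx|<=1) instead of A's building the list of compatible lengths and testing each for membership in style_lengths.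
import Mathlib
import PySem

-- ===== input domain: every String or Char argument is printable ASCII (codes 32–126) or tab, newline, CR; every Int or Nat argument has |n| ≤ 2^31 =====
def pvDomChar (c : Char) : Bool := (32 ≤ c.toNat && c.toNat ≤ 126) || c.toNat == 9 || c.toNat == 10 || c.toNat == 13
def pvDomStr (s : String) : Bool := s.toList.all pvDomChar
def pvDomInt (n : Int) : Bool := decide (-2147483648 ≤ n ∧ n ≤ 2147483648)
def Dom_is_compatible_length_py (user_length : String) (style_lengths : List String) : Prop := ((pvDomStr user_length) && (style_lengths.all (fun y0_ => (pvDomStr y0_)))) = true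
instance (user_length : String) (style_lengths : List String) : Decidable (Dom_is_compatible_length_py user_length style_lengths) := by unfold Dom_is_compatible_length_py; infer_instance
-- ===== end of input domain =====

-- B loops over style_lengths with an index-distance test instead of A's membership tests of a built candidate-length list: an alternative decomposition, same cost.


-- ===== PORT A =====
def pvLengthOrder : List String := ["pixie", "short", "medium", "long", "extra_long"]

-- compatible_indices / compatible_lengths of A; indexing is always in range here, so getD "" is exact
def pvCompat (user_idx : Int) : List String :=
  let compatible_indices : List Int :=
    [max 0 (user_idx - 1), user_idx, min ((pvLengthOrder.length : Int) - 1) (user_idx + 1)]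
  compatible_indices.map (fun i => (PySem.List.pyGet? pvLengthOrder i).getD "")

def is_compatible_length_py (user_length : String) (style_lengths : List String) : Bool :=
  if user_length ∉ pvLengthOrder ∨ style_lengths = [] then false
  else
    -- `.index` cannot raise here (the guard ensures membership), so getD 0 is exact
    let user_idx : Int := ((PySem.List.index? pvLengthOrder user_length).getD 0 : Nat)
    (pvCompat user_idx).any (fun length => decide (length ∈ style_lengths))

-- ===== PORT B =====
-- B's loop-body test: s in length_order and abs(length_order.index(s) - user_idx) <= 1
def fB (user_idx : Nat) (s : String) : Bool :=
  match PySem.List.index? pvLengthOrder s with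
  | none => false
  | some si => decide (((si : Int) - (user_idx : Int)).natAbs ≤ 1)

def is_compatible_length_py_alt (user_length : String) (style_lengths : List String) : Bool :=
  match PySem.List.index? pvLengthOrder user_length with
  | none => false
  | some user_idx => style_lengths.any (fun s => fB user_idx s)

-- ===== PRECONDITION & SPEC =====
def Spec_is_compatible_length_py (user_length : String) (style_lengths : List String) (out : Bool) : Prop := out = is_compatible_length_py_alt user_length style_lengths
instance (user_length : String) (style_lengths : List String) (out : Bool) : Decidable (Spec_is_compatible_length_py user_length style_lengths out) := by unfold Spec_is_compatible_length_py; infer_instance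

-- ===== CLAIM (what is proved, stated in full; the proofs are below) =====
def Claim_equal_is_compatible_length_py : Prop := ∀ (user_length : String) (style_lengths : List String), Dom_is_compatible_length_py user_length style_lengths → Spec_is_compatible_length_py user_length style_lengths (is_compatible_length_py user_length style_lengths)

-- ===== LEMMAS AND PROOFS =====

theorem any_mem_comm (l cs : List String) :
    cs.any (fun c => decide (c ∈ l)) = l.any (fun s => decide (s ∈ cs)) := by
  rw [Bool.eq_iff_iff]
  simp only [List.any_eq_true, decide_eq_true_eq]
  exact ⟨fun ⟨c, h1, h2⟩ => ⟨c, h2, h1⟩, fun ⟨s, h1, h2⟩ => ⟨s, h2, h1⟩⟩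

theorem fB0 (s : String) : fB 0 s = decide (s ∈ (["pixie","pixie","short"] : List String)) := by
  by_cases h1 : s = "pixie"; · subst h1; decide
  by_cases h2 : s = "short"; · subst h2; decide
  by_cases h3 : s = "medium"; · subst h3; decide
  by_cases h4 : s = "long"; · subst h4; decide
  by_cases h5 : s = "extra_long"; · subst h5; decide
  have hn : List.idxOf? s pvLengthOrder = none := by
    simp [List.idxOf?_eq_none_iff, pvLengthOrder, h1, h2, h3, h4, h5]
  simp [fB, hn, h1, h2]

theorem fB1 (s : String) : fB 1 s = decide (s ∈ (["pixie","short","medium"] : List String)) := by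
  by_cases h1 : s = "pixie"; · subst h1; decide
  by_cases h2 : s = "short"; · subst h2; decide
  by_cases h3 : s = "medium"; · subst h3; decide
  by_cases h4 : s = "long"; · subst h4; decide
  by_cases h5 : s = "extra_long"; · subst h5; decide
  have hn : List.idxOf? s pvLengthOrder = none := by
    simp [List.idxOf?_eq_none_iff, pvLengthOrder, h1, h2, h3, h4, h5]
  simp [fB, hn, h1, h2, h3]

theorem fB2 (s : String) : fB 2 s = decide (s ∈ (["short","medium","long"] : List String)) := by
  by_cases h1 : s = "pixie"; · subst h1; decide
  by_cases h2 : s = "short"; · subst h2; decide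
  by_cases h3 : s = "medium"; · subst h3; decide
  by_cases h4 : s = "long"; · subst h4; decide
  by_cases h5 : s = "extra_long"; · subst h5; decide
  have hn : List.idxOf? s pvLengthOrder = none := by
    simp [List.idxOf?_eq_none_iff, pvLengthOrder, h1, h2, h3, h4, h5]
  simp [fB, hn, h2, h3, h4]

theorem fB3 (s : String) : fB 3 s = decide (s ∈ (["medium","long","extra_long"] : List String)) := by
  by_cases h1 : s = "pixie"; · subst h1; decide
  by_cases h2 : s = "short"; · subst h2; decide
  by_cases h3 : s = "medium"; · subst h3; decide
  by_cases h4 : s = "long"; · subst h4; decide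
  by_cases h5 : s = "extra_long"; · subst h5; decide
  have hn : List.idxOf? s pvLengthOrder = none := by
    simp [List.idxOf?_eq_none_iff, pvLengthOrder, h1, h2, h3, h4, h5]
  simp [fB, hn, h3, h4, h5]

theorem fB4 (s : String) : fB 4 s = decide (s ∈ (["long","extra_long","extra_long"] : List String)) := by
  by_cases h1 : s = "pixie"; · subst h1; decide
  by_cases h2 : s = "short"; · subst h2; decide
  by_cases h3 : s = "medium"; · subst h3; decide
  by_cases h4 : s = "long"; · subst h4; decide
  by_cases h5 : s = "extra_long"; · subst h5; decide
  have hn : List.idxOf? s pvLengthOrder = none := by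
    simp [List.idxOf?_eq_none_iff, pvLengthOrder, h1, h2, h3, h4, h5]
  simp [fB, hn, h4, h5]

theorem case0 (sl : List String) :
    is_compatible_length_py "pixie" sl = is_compatible_length_py_alt "pixie" sl := by
  cases sl with
  | nil => decide
  | cons a t =>
    simp only [is_compatible_length_py, is_compatible_length_py_alt]
    rw [if_neg (by simp [pvLengthOrder])]
    rw [show ((((PySem.List.index? pvLengthOrder "pixie").getD 0 : Nat)) : Int) = 0 from by decide]
    rw [show pvCompat 0 = ["pixie","pixie","short"] from by decide]
    rw [show PySem.List.index? pvLengthOrder "pixie" = some 0 from by decide]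
    simp only [fB0]
    exact any_mem_comm (a :: t) _

theorem case1 (sl : List String) :
    is_compatible_length_py "short" sl = is_compatible_length_py_alt "short" sl := by
  cases sl with
  | nil => decide
  | cons a t =>
    simp only [is_compatible_length_py, is_compatible_length_py_alt]
    rw [if_neg (by simp [pvLengthOrder])]
    rw [show ((((PySem.List.index? pvLengthOrder "short").getD 0 : Nat)) : Int) = 1 from by decide]
    rw [show pvCompat 1 = ["pixie","short","medium"] from by decide]
    rw [show PySem.List.index? pvLengthOrder "short" = some 1 from by decide]
    simp only [fB1]
    exact any_mem_comm (a :: t) _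

theorem case2 (sl : List String) :
    is_compatible_length_py "medium" sl = is_compatible_length_py_alt "medium" sl := by
  cases sl with
  | nil => decide
  | cons a t =>
    simp only [is_compatible_length_py, is_compatible_length_py_alt]
    rw [if_neg (by simp [pvLengthOrder])]
    rw [show ((((PySem.List.index? pvLengthOrder "medium").getD 0 : Nat)) : Int) = 2 from by decide]
    rw [show pvCompat 2 = ["short","medium","long"] from by decide]
    rw [show PySem.List.index? pvLengthOrder "medium" = some 2 from by decide]
    simp only [fB2]
    exact any_mem_comm (a :: t) _

theorem case3 (sl : List String) :
    is_compatible_length_py "long" sl = is_compatible_length_py_alt "long" sl := by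
  cases sl with
  | nil => decide
  | cons a t =>
    simp only [is_compatible_length_py, is_compatible_length_py_alt]
    rw [if_neg (by simp [pvLengthOrder])]
    rw [show ((((PySem.List.index? pvLengthOrder "long").getD 0 : Nat)) : Int) = 3 from by decide]
    rw [show pvCompat 3 = ["medium","long","extra_long"] from by decide]
    rw [show PySem.List.index? pvLengthOrder "long" = some 3 from by decide]
    simp only [fB3]
    exact any_mem_comm (a :: t) _

theorem case4 (sl : List String) :
    is_compatible_length_py "extra_long" sl = is_compatible_length_py_alt "extra_long" sl := by
  cases sl with
  | nil => decide
  | cons a t =>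
    simp only [is_compatible_length_py, is_compatible_length_py_alt]
    rw [if_neg (by simp [pvLengthOrder])]
    rw [show ((((PySem.List.index? pvLengthOrder "extra_long").getD 0 : Nat)) : Int) = 4 from by decide]
    rw [show pvCompat 4 = ["long","extra_long","extra_long"] from by decide]
    rw [show PySem.List.index? pvLengthOrder "extra_long" = some 4 from by decide]
    simp only [fB4]
    exact any_mem_comm (a :: t) _

theorem case_none (u : String) (h : u ∉ pvLengthOrder) (sl : List String) :
    is_compatible_length_py u sl = is_compatible_length_py_alt u sl := by
  have hn : List.idxOf? u pvLengthOrder = none := by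
    simp [List.idxOf?_eq_none_iff, h]
  simp [is_compatible_length_py, is_compatible_length_py_alt, hn, h]

-- ===== VERDICT (by name: the statement is the Claim_ definition above) =====
theorem is_compatible_length_py_spec : Claim_equal_is_compatible_length_py := by
  intro u sl _
  unfold Spec_is_compatible_length_py
  by_cases hu : u ∈ pvLengthOrder
  · simp only [pvLengthOrder, List.mem_cons, List.not_mem_nil, or_false] at hu
    rcases hu with rfl | rfl | rfl | rfl | rfl
    · exact case0 sl
    · exact case1 sl
    · exact case2 sl
    · exact case3 sl
    · exact case4 sl
  · exact case_none u hu sl
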